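-- pv_equiv track=rewrite | github.com/benyy0101/Baekjoon-problems | 프로그래머스/lv1/17681. ［1차］ 비밀지도/［1차］ 비밀지도.py | bin_or
-- ===== SOURCE A (Python) =====
-- def bin_or(a,b):
--     result = ''
--     for i in range(len(a)):
--         temp1 = a[i]
--         temp2 = b[i]
--         if temp1 == '1' or temp2 == '1':
--             result += '#'
--         else:
--             result += ' '
--     return result
-- ===== SOURCE B (Python) =====
-- def bin_or(a, b):
--     # Build the map from a alone, then overlay the '1' positions of b.
--     marks = ['#' if c == '1' else ' ' for c in a]
--     for i, c in enumerate(b[:len(a)]):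
--         if c == '1':
--             marks[i] = '#'
--     return ''.join(marks)
-- ===== Notes on version B (the rewrite author's own statement) =====
-- stated objective: faster
-- what changed: Instead of scanning character pairs and appending '#'/' ' to a growing string per index, B maps a to a list of marks and overlays the '1' positions of b[:len(a)] by in-place list assignment, joining once at the end (avoids repeated string concatenation).
import Mathlib
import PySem

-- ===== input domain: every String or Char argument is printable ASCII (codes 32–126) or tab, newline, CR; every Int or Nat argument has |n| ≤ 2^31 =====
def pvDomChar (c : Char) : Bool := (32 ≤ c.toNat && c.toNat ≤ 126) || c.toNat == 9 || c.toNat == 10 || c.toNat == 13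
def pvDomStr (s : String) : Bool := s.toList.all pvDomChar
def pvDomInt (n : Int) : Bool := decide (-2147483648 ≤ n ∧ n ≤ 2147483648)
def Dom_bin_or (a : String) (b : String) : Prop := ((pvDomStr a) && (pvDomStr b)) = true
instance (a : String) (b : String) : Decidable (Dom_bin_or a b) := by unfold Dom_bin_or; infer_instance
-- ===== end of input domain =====

-- B builds the mark list from a and overlays the '1' positions of b, instead of
-- scanning character pairs with a conditional string append (measured constant-factor speedup).


-- ===== PORT A =====
def bin_or (a : String) (b : String) : String :=
  String.mk ((PySem.List.pyRange 0 (PySem.List.len a.toList) 1).foldl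
    (fun result i =>
      let temp1 := PySem.List.pyGetD a.toList i ' '
      let temp2 := PySem.List.pyGetD b.toList i ' '
      result ++ (if temp1 = '1' ∨ temp2 = '1' then ['#'] else [' '])) [])

-- ===== PORT B =====
def bin_or_alt (a : String) (b : String) : String :=
  let marks := a.toList.map (fun c => if c = '1' then '#' else ' ')
  String.mk ((PySem.List.enumerate (PySem.List.slice b.toList none (some (PySem.List.len a.toList))) 0).foldl
    (fun m p => if p.2 = '1' then PySem.List.pySetD m p.1 '#' else m) marks)

-- ===== PRECONDITION & SPEC =====
-- A raises IndexError at b[i] when len(b) < len(a); exactly those inputs are excluded.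
def Pre_bin_or (a : String) (b : String) : Prop := a.toList.length ≤ b.toList.length
instance (a : String) (b : String) : Decidable (Pre_bin_or a b) := by unfold Pre_bin_or; infer_instance
def pvWitness_bin_or : String × String := ("10", "01")

def Spec_bin_or (a : String) (b : String) (out : String) : Prop := out = bin_or_alt a b
instance (a : String) (b : String) (out : String) : Decidable (Spec_bin_or a b out) := by unfold Spec_bin_or; infer_instance

-- ===== CLAIM =====
def Claim_equal_bin_or : Prop := ∀ (a : String) (b : String), Dom_bin_or a b → Pre_bin_or a b → Spec_bin_or a b (bin_or a b)

-- ===== LEMMAS AND PROOFS =====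

-- B's overlay loop as a closed form: the prefix before s, a zipWith over t, and the untouched tail.
theorem overlay_closed (t : List Char) : ∀ (s : Nat) (m : List Char), s + t.length ≤ m.length →
    (PySem.List.enumerate t (s : Int)).foldl
      (fun m p => if p.2 = '1' then PySem.List.pySetD m p.1 '#' else m) m
    = m.take s ++ t.zipWith (fun c d => if c = '1' then '#' else d) (m.drop s)
        ++ m.drop (s + t.length) := by
  induction t with
  | nil => intro s m h; simp
  | cons c t ih =>
    intro s m h
    have hs : s < m.length := by simp at h; omega
    rw [PySem.List.enumerate_cons]
    simp only [List.foldl_cons]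
    have hd : m.drop s = m[s] :: m.drop (s + 1) := (List.drop_eq_getElem_cons hs)
    by_cases hc : c = '1'
    · have hset : (if (((s : Int), c) : Int × Char).2 = '1'
          then PySem.List.pySetD m (((s : Int), c) : Int × Char).1 '#' else m) = m.set s '#' := by
        simp [hc]
      rw [hset]
      have hstep : ((s : Int) + 1) = ((s + 1 : Nat) : Int) := by push_cast; ring
      rw [hstep, ih (s + 1) (m.set s '#') (by simp at h ⊢; omega)]
      have h1 : (m.set s '#').take (s + 1) = m.take s ++ ['#'] := by
        apply List.ext_getElem
        · simp; omega
        · intro j hj1 hj2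
          have hj : j < s + 1 := by simp at hj1; omega
          simp only [List.getElem_take, List.getElem_set]
          rcases Nat.lt_or_ge j s with hlt | hge
          · rw [List.getElem_append_left (by simpa [hs.le] using hlt)]
            simp [List.getElem_take, Nat.ne_of_gt hlt]
          · have hjs : j = s := by omega
            subst hjs
            rw [List.getElem_append_right (by simp [hs.le])]
            simp [hs.le]
      have h2 : (m.set s '#').drop (s + 1) = m.drop (s + 1) := by
        rw [List.drop_set]; simp
      have h3 : (m.set s '#').drop (s + 1 + t.length) = m.drop (s + 1 + t.length) := by
        simp only [List.drop_set, if_pos (show s < s + 1 + t.length by omega)]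
      have hidx : s + 1 + t.length = s + (t.length + 1) := by omega
      rw [h1, h2, h3, hd, hidx]
      subst hc
      simp only [List.zipWith_cons_cons]
      simp [List.append_assoc]
    · have hset : (if (((s : Int), c) : Int × Char).2 = '1'
          then PySem.List.pySetD m (((s : Int), c) : Int × Char).1 '#' else m) = m := by
        simp [hc]
      rw [hset]
      have hstep : ((s : Int) + 1) = ((s + 1 : Nat) : Int) := by push_cast; ring
      rw [hstep, ih (s + 1) m (by simp at h ⊢; omega)]
      have h1 : m.take (s + 1) = m.take s ++ [m[s]] := by
        rw [List.take_add_one]; simp [List.getElem?_eq_getElem hs]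
      have hidx : s + 1 + t.length = s + (t.length + 1) := by omega
      rw [h1, hd, hidx]
      simp only [List.zipWith_cons_cons]
      rw [if_neg hc]
      simp only [List.cons_append, List.append_assoc, List.length_cons]
      simp

-- A's loop as a map over the index range.
theorem binA_map (la lb : List Char) :
    (PySem.List.pyRange 0 (PySem.List.len la) 1).foldl
      (fun result i =>
        let temp1 := PySem.List.pyGetD la i ' '
        let temp2 := PySem.List.pyGetD lb i ' '
        result ++ (if temp1 = '1' ∨ temp2 = '1' then ['#'] else [' '])) []
    = (PySem.List.pyRange 0 (PySem.List.len la) 1).map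
        (fun i => if PySem.List.pyGetD la i ' ' = '1' ∨ PySem.List.pyGetD lb i ' ' = '1'
                  then '#' else ' ') := by
  have hite : ∀ (P : Prop) [Decidable P],
      (if P then (['#'] : List Char) else [' ']) = [if P then '#' else ' '] := by
    intro P _; split <;> rfl
  simp only [hite]
  rw [PySem.List.foldl_append_singleton_eq_map]
  simp

theorem core_eq (la lb : List Char) (h : la.length ≤ lb.length) :
    (PySem.List.pyRange 0 (PySem.List.len la) 1).foldl
      (fun result i =>
        let temp1 := PySem.List.pyGetD la i ' '
        let temp2 := PySem.List.pyGetD lb i ' '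
        result ++ (if temp1 = '1' ∨ temp2 = '1' then ['#'] else [' '])) []
    = (PySem.List.enumerate (PySem.List.slice lb none (some (PySem.List.len la))) 0).foldl
        (fun m p => if p.2 = '1' then PySem.List.pySetD m p.1 '#' else m)
        (la.map (fun c => if c = '1' then '#' else ' ')) := by
  rw [binA_map]
  have hslice : PySem.List.slice lb none (some (PySem.List.len la)) = lb.take la.length := by
    simp [PySem.List.len_eq, PySem.List.slice_to_natCast]
  have h0 : ((0 : Int)) = ((0 : Nat) : Int) := rfl
  rw [hslice, h0, overlay_closed (lb.take la.length) 0
        (la.map (fun c => if c = '1' then '#' else ' '))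
        (by simp [h])]
  have hlen : (lb.take la.length).length = la.length := by simp [h]
  apply List.ext_getElem
  · simp [PySem.List.len_eq, PySem.List.length_pyRange_one, h]
  · intro j hj1 hj2
    have hjlen : j < la.length := by
      simpa [PySem.List.len_eq, PySem.List.length_pyRange_one] using hj1
    have hjb : j < lb.length := lt_of_lt_of_le hjlen h
    simp only [List.getElem_map]
    rw [PySem.List.getElem_pyRange_one]
    have hcast : (((0 : Nat) : Int)) + (j : Int) = ((j : Nat) : Int) := by push_cast; ring
    rw [hcast, PySem.List.pyGetD_natCast, PySem.List.pyGetD_natCast]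
    simp [List.getElem_append, List.getElem_zipWith, List.getElem_take, List.getElem_map,
          List.getD_eq_getElem?_getD, List.getElem?_eq_getElem, hjlen, hjb, hlen, h]
    by_cases h1 : lb[j] = '1' <;> by_cases h2 : la[j] = '1' <;> simp [h1, h2]

-- ===== VERDICT =====
theorem bin_or_spec : Claim_equal_bin_or := by
  intro a b _ hpre
  unfold Spec_bin_or bin_or bin_or_alt
  exact congrArg String.mk (core_eq a.toList b.toList hpre)
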